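-- pv_equiv track=rewrite | github.com/SreeSaranE/Python-Programs | starter_project/crack_pass1.py | main_program
-- ===== SOURCE A (Python) =====
-- import string
-- import itertools
--
-- def cap_check(user_password:str):
--     for i in user_password:
--         if i.isupper():
--             return True
--
-- def punch_check(user_password:str):
--     for i in user_password:
--         if i in string.punctuation:
--             return True
--
-- def digits_check(user_password:str):
--     for i in user_password:
--         if i in string.digits:
--             return True
--
-- def main_program(password: str, pass_length: int):
--     char: str = string.ascii_lowercase
--     if cap_check(password):
--         char = char+string.ascii_uppercase
--     if punch_check(password):
--         char = char+string.punctuation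
--     if digits_check(password):
--         char = char+string.digits
--
--     attempt: int = 0
--     for guess in itertools.product(char, repeat=pass_length):
--         attempt+= 1
--         guess = ''.join(guess)
--
--         if guess == password:
--             return(f"{password} was cracked in {attempt}")
-- ===== SOURCE B (Python) =====
-- import string
--
-- def main_program(password: str, pass_length: int):
--     char = string.ascii_lowercase
--     if any(c.isupper() for c in password):
--         char += string.ascii_uppercase
--     if any(c in string.punctuation for c in password):
--         char += string.punctuation
--     if any(c in string.digits for c in password):
--         char += string.digits
--
--     if len(password) != pass_length:
--         return None
--     try:
--         indices = [char.index(c) for c in password]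
--     except ValueError:
--         return None
--     attempt = 0
--     for i in indices:
--         attempt = attempt * len(char) + i
--     return f"{password} was cracked in {attempt + 1}"
-- ===== Notes on version B (the rewrite author's own statement) =====
-- stated objective: faster
-- what changed: Instead of enumerating every candidate string from itertools.product and counting attempts until the password matches, B computes the password's 1-based position directly as its mixed-radix rank in the lexicographic alphabet (attempt = fold of index digits), returning None when the length differs or a character is outside the alphabet; intended as faster (O(|char|^pass_length) enumeration replaced by O(pass_length) arithmetic): a timing run saw A time out at moderate sizes where B returned instantly, but reported the ratio as unconfirmed because too few inputs had both programs finish.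
import Mathlib
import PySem

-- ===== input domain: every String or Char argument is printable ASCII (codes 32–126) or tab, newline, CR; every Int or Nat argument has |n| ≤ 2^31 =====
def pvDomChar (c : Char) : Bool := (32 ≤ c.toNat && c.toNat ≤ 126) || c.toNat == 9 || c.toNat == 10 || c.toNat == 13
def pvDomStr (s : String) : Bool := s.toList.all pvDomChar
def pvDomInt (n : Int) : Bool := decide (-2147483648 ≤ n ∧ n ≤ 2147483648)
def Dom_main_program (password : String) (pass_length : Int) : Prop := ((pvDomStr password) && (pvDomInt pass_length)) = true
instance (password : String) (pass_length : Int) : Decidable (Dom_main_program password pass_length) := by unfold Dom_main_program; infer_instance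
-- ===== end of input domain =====

-- B replaces A's brute-force enumeration of all len(char)^pass_length candidate strings by a
-- direct O(pass_length) mixed-radix rank computation of the password in the same alphabet.

-- ===== PORT A =====
def pvLower : List Char := "abcdefghijklmnopqrstuvwxyz".toList
def pvUpper : List Char := "ABCDEFGHIJKLMNOPQRSTUVWXYZ".toList
def pvPunct : List Char := "!\"#$%&'()*+,-./:;<=>?@[\\]^_`{|}~".toList
def pvDigits : List Char := "0123456789".toList

-- for i in user_password: if i.isupper(): return True   (falls through → None, i.e. falsy)
def capCheck : List Char → Bool
  | [] => false
  | c :: rest => if PySem.Chars.isupper c then true else capCheck rest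

def punchCheck : List Char → Bool
  | [] => false
  | c :: rest => if pvPunct.contains c then true else punchCheck rest

def digitsCheck : List Char → Bool
  | [] => false
  | c :: rest => if pvDigits.contains c then true else digitsCheck rest

-- itertools.product(char, repeat=k) in order (leftmost position most significant)
def aProd (chars : List Char) : Nat → List (List Char)
  | 0 => [[]]
  | Nat.succ k => chars.flatMap (fun c => (aProd chars k).map (fun g => c :: g))

-- the for-loop over the product, counting attempts; guess == password compared as char lists
def aLoop (password : String) : List (List Char) → Int → Option String
  | [], _ => none
  | g :: rest, attempt =>
      if g = password.toList then
        some (password ++ " was cracked in " ++ PySem.Int.toStr (attempt + 1))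
      else aLoop password rest (attempt + 1)

def main_program (password : String) (pass_length : Int) : Option String :=
  let char := pvLower
  let char := if capCheck password.toList then char ++ pvUpper else char
  let char := if punchCheck password.toList then char ++ pvPunct else char
  let char := if digitsCheck password.toList then char ++ pvDigits else char
  -- itertools.product raises ValueError for a negative repeat; those inputs are outside Pre_
  if pass_length < 0 then none
  else aLoop password (aProd char pass_length.toNat) 0

-- ===== PORT B =====
def altAlphabet (s : List Char) : List Char :=
  let char := pvLower
  let char := if s.any PySem.Chars.isupper then char ++ pvUpper else char
  let char := if s.any (fun c => pvPunct.contains c) then char ++ pvPunct else char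
  if s.any (fun c => pvDigits.contains c) then char ++ pvDigits else char

def main_program_alt (password : String) (pass_length : Int) : Option String :=
  let s := password.toList
  let char := altAlphabet s
  if (s.length : Int) ≠ pass_length then none
  else
    match s.mapM (fun c => PySem.List.index? char c) with    -- char.index(c), ValueError → none
    | none => none
    | some idxs =>
        some (password ++ " was cracked in " ++
          PySem.Int.toStr ((idxs.foldl (fun a i => a * char.length + i) 0 : Nat) + 1))

-- ===== PRECONDITION & SPEC =====
-- Pre_ excludes only pass_length < 0, where A raises ValueError (itertools.product with negative repeat).
def Pre_main_program (password : String) (pass_length : Int) : Prop := 0 ≤ pass_length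
instance (password : String) (pass_length : Int) : Decidable (Pre_main_program password pass_length) := by unfold Pre_main_program; infer_instance
def pvWitness_main_program : String × Int := ("ab", 2)

def Spec_main_program (password : String) (pass_length : Int) (out : Option String) : Prop := out = main_program_alt password pass_length
instance (password : String) (pass_length : Int) (out : Option String) : Decidable (Spec_main_program password pass_length out) := by unfold Spec_main_program; infer_instance

-- ===== CLAIM (what is proved, stated in full; the proofs are below) =====
def Claim_equal_main_program : Prop := ∀ (password : String) (pass_length : Int), Dom_main_program password pass_length → Pre_main_program password pass_length → Spec_main_program password pass_length (main_program password pass_length)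

-- ===== LEMMAS AND PROOFS =====

-- mixed-radix rank of s in the alphabet chars
def pvRank (chars s : List Char) : Nat :=
  s.foldl (fun r c => r * chars.length + chars.idxOf c) 0

lemma capCheck_eq_any (s : List Char) : capCheck s = s.any PySem.Chars.isupper := by
  induction s with
  | nil => rfl
  | cons c t ih => simp [capCheck, List.any_cons, ih]

lemma punchCheck_eq_any (s : List Char) : punchCheck s = s.any (fun c => pvPunct.contains c) := by
  induction s with
  | nil => rfl
  | cons c t ih => simp [punchCheck, List.any_cons, ih]

lemma digitsCheck_eq_any (s : List Char) : digitsCheck s = s.any (fun c => pvDigits.contains c) := by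
  induction s with
  | nil => rfl
  | cons c t ih => simp [digitsCheck, List.any_cons, ih]

lemma pvRank_foldl_shift (chars t : List Char) (r0 : Nat) :
    t.foldl (fun r c => r * chars.length + chars.idxOf c) r0
      = r0 * chars.length ^ t.length + pvRank chars t := by
  induction t generalizing r0 with
  | nil => simp [pvRank]
  | cons c t ih =>
    simp only [List.foldl_cons, List.length_cons]
    rw [ih, show pvRank chars (c :: t)
          = (0 * chars.length + chars.idxOf c) * chars.length ^ t.length + pvRank chars t from by
        simpa [pvRank] using ih (0 * chars.length + chars.idxOf c)]
    ring

lemma pvRank_cons (chars : List Char) (c : Char) (t : List Char) :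
    pvRank chars (c :: t) = chars.idxOf c * chars.length ^ t.length + pvRank chars t := by
  unfold pvRank
  simp only [List.foldl_cons]
  rw [pvRank_foldl_shift]
  simp [pvRank]

lemma length_aProd (chars : List Char) (k : Nat) :
    (aProd chars k).length = chars.length ^ k := by
  induction k with
  | zero => simp [aProd]
  | succ k ih =>
    simp [aProd, List.length_flatMap, ih, pow_succ, mul_comm]

lemma aLoop_eq_findIdx? (p : String) (gs : List (List Char)) (a : Int) :
    aLoop p gs a
      = (List.findIdx? (fun g => g == p.toList) gs).map
          (fun (i : Nat) => p ++ " was cracked in " ++ PySem.Int.toStr (a + (i : Int) + 1)) := by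
  induction gs generalizing a with
  | nil => simp [aLoop]
  | cons g rest ih =>
    simp only [aLoop, List.findIdx?_cons, beq_iff_eq]
    by_cases h : g = p.toList
    · simp [h]
    · rw [if_neg h, if_neg h, ih (a + 1)]
      cases hr : List.findIdx? (fun g => g == p.toList) rest with
      | none => simp
      | some i =>
        simp only [Option.map_some]
        have harg : a + 1 + (i : Int) + 1 = a + ((i + 1 : Nat) : Int) + 1 := by push_cast; ring
        rw [harg]

lemma findIdx?_blocks_nil (chars : List Char) (k : Nat) (cs : List Char) :
    List.findIdx? (fun g => g == ([] : List Char))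
        (cs.flatMap (fun c => (aProd chars k).map (fun g => c :: g))) = none := by
  rw [List.findIdx?_eq_none_iff]
  intro x hx
  simp only [List.mem_flatMap, List.mem_map] at hx
  obtain ⟨c, -, g, -, rfl⟩ := hx
  simp

lemma findIdx?_blocks_cons (chars : List Char) (k : Nat)
    (IH : ∀ s : List Char, List.findIdx? (fun g => g == s) (aProd chars k)
        = if s.length = k ∧ ∀ c ∈ s, c ∈ chars then some (pvRank chars s) else none)
    (c' : Char) (t : List Char) :
    ∀ (cs : List Char),
    List.findIdx? (fun g => g == (c' :: t)) (cs.flatMap (fun c => (aProd chars k).map (fun g => c :: g)))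
      = if c' ∈ cs ∧ t.length = k ∧ ∀ c ∈ t, c ∈ chars
        then some (cs.idxOf c' * chars.length ^ k + pvRank chars t)
        else none := by
  intro cs
  induction cs with
  | nil => simp
  | cons c cs ihcs =>
    rw [List.flatMap_cons, List.findIdx?_append, List.findIdx?_map]
    by_cases hc : c = c'
    · subst hc
      have h1 : ((fun g => g == (c :: t)) ∘ (fun g => c :: g)) = (fun g => g == t) := by
        funext g; simp
      rw [h1, IH t]
      by_cases hcond : t.length = k ∧ ∀ x ∈ t, x ∈ chars
      · rw [if_pos hcond, Option.some_or,
          if_pos (⟨List.mem_cons_self, hcond⟩ : c ∈ c :: cs ∧ t.length = k ∧ ∀ x ∈ t, x ∈ chars),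
          List.idxOf_cons_self]
        simp
      · rw [if_neg hcond, Option.none_or, ihcs,
          if_neg (fun h => hcond h.2 : ¬ (c ∈ cs ∧ t.length = k ∧ ∀ x ∈ t, x ∈ chars)),
          if_neg (fun h => hcond h.2 : ¬ (c ∈ c :: cs ∧ t.length = k ∧ ∀ x ∈ t, x ∈ chars))]
        simp
    · have h1 : List.findIdx? ((fun g => g == (c' :: t)) ∘ (fun g => c :: g)) (aProd chars k) = none := by
        rw [List.findIdx?_eq_none_iff]; intro x _; simp [hc]
      have hbeq : (c == c') = false := by simp [hc]
      have hidx : List.idxOf c' (c :: cs) = List.idxOf c' cs + 1 := by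
        simp [List.idxOf_cons, hbeq]
      rw [h1, Option.none_or, ihcs]
      by_cases hcond : c' ∈ cs ∧ t.length = k ∧ ∀ x ∈ t, x ∈ chars
      · rw [if_pos hcond,
          if_pos (⟨List.mem_cons_of_mem _ hcond.1, hcond.2⟩ :
            c' ∈ c :: cs ∧ t.length = k ∧ ∀ x ∈ t, x ∈ chars),
          Option.map_some, List.length_map, length_aProd, hidx]
        congr 1
        ring
      · have hmem : ¬ (c' ∈ c :: cs ∧ t.length = k ∧ ∀ x ∈ t, x ∈ chars) := by
          intro ⟨h1', h2'⟩
          rcases List.mem_cons.mp h1' with h | h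
          · exact hc h.symm
          · exact hcond ⟨h, h2'⟩
        rw [if_neg hcond, if_neg hmem]
        simp

lemma findIdx?_aProd (chars : List Char) (k : Nat) (s : List Char) :
    List.findIdx? (fun g => g == s) (aProd chars k)
      = if s.length = k ∧ ∀ c ∈ s, c ∈ chars then some (pvRank chars s) else none := by
  induction k generalizing s with
  | zero =>
    cases s with
    | nil =>
      have h : List.findIdx? (fun g => g == ([] : List Char)) (aProd chars 0) = some 0 := rfl
      rw [h]
      simp [pvRank]
    | cons c' t =>
      have h : List.findIdx? (fun g => g == (c' :: t)) (aProd chars 0) = none := rfl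
      rw [h]
      simp
  | succ k ih =>
    show List.findIdx? (fun g => g == s) (chars.flatMap (fun c => (aProd chars k).map (fun g => c :: g))) = _
    cases s with
    | nil => rw [findIdx?_blocks_nil]; simp
    | cons c' t =>
      rw [findIdx?_blocks_cons chars k ih c' t chars]
      by_cases hcond : c' ∈ chars ∧ t.length = k ∧ ∀ x ∈ t, x ∈ chars
      · have h2 : (c' :: t).length = k + 1 ∧ ∀ x ∈ c' :: t, x ∈ chars := by
          refine ⟨by simp [hcond.2.1], ?_⟩
          intro x hx
          rcases List.mem_cons.mp hx with h | h
          · exact h ▸ hcond.1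
          · exact hcond.2.2 x h
        rw [if_pos hcond, if_pos h2, pvRank_cons, hcond.2.1]
      · have h2 : ¬ ((c' :: t).length = k + 1 ∧ ∀ x ∈ c' :: t, x ∈ chars) := by
          intro ⟨hl, hm⟩
          exact hcond ⟨hm c' (by simp), by simpa using hl, fun x hx => hm x (by simp [hx])⟩
        rw [if_neg hcond, if_neg h2]


lemma idxOf?_of_mem (c : Char) (l : List Char) (h : c ∈ l) :
    List.idxOf? c l = some (List.idxOf c l) := by
  induction l with
  | nil => simp at h
  | cons a l ih =>
    by_cases hac : a = c
    · subst hac; simp [List.idxOf?_cons]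
    · have hb : (a == c) = false := by simp [hac]
      rcases List.mem_cons.mp h with h' | h'
      · exact absurd h'.symm hac
      · simp [List.idxOf?_cons, List.idxOf_cons, hb, ih h']

lemma mapM_index? (chars : List Char) (s : List Char) :
    s.mapM (fun c => PySem.List.index? chars c)
      = if ∀ c ∈ s, c ∈ chars then some (s.map (fun c => chars.idxOf c)) else none := by
  induction s with
  | nil => simp
  | cons c t ih =>
    rw [List.mapM_cons, PySem.List.index?_eq_idxOf?]
    by_cases hm : c ∈ chars
    · rw [idxOf?_of_mem c chars hm, ih]
      by_cases ht : ∀ x ∈ t, x ∈ chars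
      · have hall : ∀ x ∈ c :: t, x ∈ chars := by
          intro x hx
          rcases List.mem_cons.mp hx with h | h
          · exact h ▸ hm
          · exact ht x h
        rw [if_pos ht, if_pos hall]
        rfl
      · rw [if_neg ht, if_neg (fun h => ht (fun x hx => h x (List.mem_cons_of_mem _ hx)))]
        rfl
    · rw [List.idxOf?_eq_none_iff.mpr hm,
        if_neg (fun h => hm (h c List.mem_cons_self))]
      rfl

-- ===== VERDICT (by name: the statement is the Claim_ definition above) =====
theorem main_program_spec : Claim_equal_main_program := by
  intro password L _hdom hpre
  unfold Pre_main_program at hpre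
  unfold Spec_main_program main_program main_program_alt altAlphabet
  simp only [capCheck_eq_any, punchCheck_eq_any, digitsCheck_eq_any]
  generalize (if password.toList.any (fun c => pvDigits.contains c) then
      (if password.toList.any (fun c => pvPunct.contains c) then
        (if password.toList.any PySem.Chars.isupper then pvLower ++ pvUpper else pvLower) ++ pvPunct
       else (if password.toList.any PySem.Chars.isupper then pvLower ++ pvUpper else pvLower)) ++ pvDigits
    else (if password.toList.any (fun c => pvPunct.contains c) then
        (if password.toList.any PySem.Chars.isupper then pvLower ++ pvUpper else pvLower) ++ pvPunct
       else (if password.toList.any PySem.Chars.isupper then pvLower ++ pvUpper else pvLower))) = chars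
  rw [if_neg (by omega : ¬ L < 0), aLoop_eq_findIdx?, findIdx?_aProd, mapM_index?]
  by_cases hlen : (password.toList.length : Int) = L
  · rw [if_neg (by omega : ¬ ((password.toList.length : Int) ≠ L))]
    by_cases hmem : ∀ c ∈ password.toList, c ∈ chars
    · rw [if_pos (⟨by omega, hmem⟩ : password.toList.length = L.toNat ∧ ∀ c ∈ password.toList, c ∈ chars),
        if_pos hmem]
      simp only [Option.map_some]
      have hfold : (password.toList.map (fun c => chars.idxOf c)).foldl
          (fun a i => a * chars.length + i) 0 = pvRank chars password.toList := by
        rw [List.foldl_map]; rfl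
      rw [hfold]
      have harg : (0 : Int) + (pvRank chars password.toList : Int) + 1
          = ((pvRank chars password.toList : Int)) + 1 := by ring
      rw [harg]
    · rw [if_neg (fun h => hmem h.2), if_neg hmem]
      simp
  · rw [if_pos (by omega : ((password.toList.length : Int) ≠ L)),
      if_neg (by intro h; exact hlen (by omega) : ¬ (password.toList.length = L.toNat ∧ ∀ c ∈ password.toList, c ∈ chars))]
    simp
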